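-- pv_equiv track=rewrite | github.com/atcs-wang/AI_Lab2_Games | lab2_util_eval.py | count_open_sequence
-- ===== SOURCE A (Python) =====
-- def count_open_sequence(seq, maximizer_player_num):
--     """
--     Given a list of piece numbers and 0s, seq:
--     If only open spaces and maximizer pieces, return how many pieces.
--     If only open spaces and minimizer pieces, return negative how many pieces.
--     If any mix of maximizer or minimizer pieces, return 0.
--     """
--     count = 0
--     for piece in seq:
--         if piece == 0:
--             continue
--         elif piece == maximizer_player_num:
--             if count >= 0:
--                 count += 1
--             else :
--                 return 0
--         else :
--             if count <= 0:
--                 count -= 1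
--             else :
--                 return 0
--     return count
-- ===== SOURCE B (Python) =====
-- def count_open_sequence(seq, maximizer_player_num):
--     maxc = sum(1 for p in seq if p != 0 and p == maximizer_player_num)
--     minc = sum(1 for p in seq if p != 0 and p != maximizer_player_num)
--     if maxc and minc:
--         return 0
--     if maxc:
--         return maxc
--     return -minc
-- ===== Notes on version B (the rewrite author's own statement) =====
-- stated objective: simpler
-- what changed: Replaces the signed running accumulator with its early-return sign checks by two aggregate counts (maximizer pieces, minimizer pieces) and a single final branch.
import Mathlib
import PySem

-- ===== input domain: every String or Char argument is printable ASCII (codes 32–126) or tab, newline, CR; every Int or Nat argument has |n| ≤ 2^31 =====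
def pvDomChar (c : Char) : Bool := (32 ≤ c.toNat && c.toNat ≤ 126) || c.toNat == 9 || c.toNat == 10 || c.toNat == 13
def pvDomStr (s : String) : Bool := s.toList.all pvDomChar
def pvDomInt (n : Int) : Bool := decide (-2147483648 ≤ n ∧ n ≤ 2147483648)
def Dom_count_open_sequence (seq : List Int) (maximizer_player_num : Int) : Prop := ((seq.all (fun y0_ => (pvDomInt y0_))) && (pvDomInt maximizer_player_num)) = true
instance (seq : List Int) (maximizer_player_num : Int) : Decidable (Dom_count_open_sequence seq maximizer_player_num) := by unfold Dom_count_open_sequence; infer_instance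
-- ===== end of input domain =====

-- B replaces A's signed running accumulator and early returns by two aggregate counts
-- and a single final branch (objective: simpler decomposition, same O(n) cost).

-- ===== PORT A =====
-- A's loop with its early returns, carrying the signed running count
def pvLoopA (m : Int) (count : Int) : List Int → Int
  | [] => count
  | piece :: rest =>
    if piece = 0 then pvLoopA m count rest
    else if piece = m then
      (if count ≥ 0 then pvLoopA m (count + 1) rest else 0)
    else
      (if count ≤ 0 then pvLoopA m (count - 1) rest else 0)

def count_open_sequence (seq : List Int) (maximizer_player_num : Int) : Int :=
  pvLoopA maximizer_player_num 0 seq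

-- ===== PORT B =====
-- B: count maximizer pieces and minimizer pieces, then decide once
def count_open_sequence_alt (seq : List Int) (maximizer_player_num : Int) : Int :=
  let maxc : Int := (seq.filter (fun p => decide (p ≠ 0) && decide (p = maximizer_player_num))).length
  let minc : Int := (seq.filter (fun p => decide (p ≠ 0) && decide (p ≠ maximizer_player_num))).length
  if maxc ≠ 0 ∧ minc ≠ 0 then 0
  else if maxc ≠ 0 then maxc
  else -minc

-- ===== PRECONDITION & SPEC =====
def Spec_count_open_sequence (seq : List Int) (maximizer_player_num : Int) (out : Int) : Prop := out = count_open_sequence_alt seq maximizer_player_num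
instance (seq : List Int) (maximizer_player_num : Int) (out : Int) : Decidable (Spec_count_open_sequence seq maximizer_player_num out) := by unfold Spec_count_open_sequence; infer_instance

-- ===== CLAIM (what is proved, stated in full; the proofs are below) =====
def Claim_equal_count_open_sequence : Prop := ∀ (seq : List Int) (maximizer_player_num : Int), Dom_count_open_sequence seq maximizer_player_num → Spec_count_open_sequence seq maximizer_player_num (count_open_sequence seq maximizer_player_num)

-- ===== LEMMAS AND PROOFS =====
-- characterisation of A's loop for an arbitrary starting count, by the two aggregate counts
theorem pvLoopA_char (m : Int) : ∀ (seq : List Int) (count : Int),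
    pvLoopA m count seq =
      (if 0 < count then
         (if ((seq.filter (fun p => decide (p ≠ 0) && decide (p ≠ m))).length : Int) = 0 then
            count + ((seq.filter (fun p => decide (p ≠ 0) && decide (p = m))).length : Int) else 0)
       else if count < 0 then
         (if ((seq.filter (fun p => decide (p ≠ 0) && decide (p = m))).length : Int) = 0 then
            count - ((seq.filter (fun p => decide (p ≠ 0) && decide (p ≠ m))).length : Int) else 0)
       else if ((seq.filter (fun p => decide (p ≠ 0) && decide (p = m))).length : Int) ≠ 0 ∧
               ((seq.filter (fun p => decide (p ≠ 0) && decide (p ≠ m))).length : Int) ≠ 0 then 0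
       else if ((seq.filter (fun p => decide (p ≠ 0) && decide (p = m))).length : Int) ≠ 0 then
         ((seq.filter (fun p => decide (p ≠ 0) && decide (p = m))).length : Int)
       else -((seq.filter (fun p => decide (p ≠ 0) && decide (p ≠ m))).length : Int)) := by
  intro seq
  induction seq with
  | nil =>
    intro count
    simp only [pvLoopA, List.filter_nil, List.length_nil]
    split_ifs <;> omega
  | cons p rest ih =>
    intro count
    by_cases hp0 : p = 0
    · have e1 : List.filter (fun q => decide (q ≠ 0) && decide (q = m)) (p :: rest)
          = List.filter (fun q => decide (q ≠ 0) && decide (q = m)) rest := by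
        rw [List.filter_cons, if_neg (by simp [hp0])]
      have e2 : List.filter (fun q => decide (q ≠ 0) && decide (q ≠ m)) (p :: rest)
          = List.filter (fun q => decide (q ≠ 0) && decide (q ≠ m)) rest := by
        rw [List.filter_cons, if_neg (by simp [hp0])]
      rw [show pvLoopA m count (p :: rest) = pvLoopA m count rest by
            simp only [pvLoopA]; rw [if_pos hp0]]
      rw [ih, e1, e2]
    · by_cases hpm : p = m
      · have e1 : List.filter (fun q => decide (q ≠ 0) && decide (q = m)) (p :: rest)
            = p :: List.filter (fun q => decide (q ≠ 0) && decide (q = m)) rest := by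
          rw [List.filter_cons, if_pos (by rw [← hpm]; simp [hp0])]
        have e2 : List.filter (fun q => decide (q ≠ 0) && decide (q ≠ m)) (p :: rest)
            = List.filter (fun q => decide (q ≠ 0) && decide (q ≠ m)) rest := by
          rw [List.filter_cons, if_neg (by simp [hpm])]
        rw [show pvLoopA m count (p :: rest)
              = (if count ≥ 0 then pvLoopA m (count + 1) rest else 0) by
            simp only [pvLoopA]; rw [if_neg hp0, if_pos hpm]]
        rw [e1, e2]
        by_cases hc : count ≥ 0
        · rw [if_pos hc, ih]
          simp only [List.length_cons]
          split_ifs <;> push_cast <;> omega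
        · rw [if_neg hc]
          simp only [List.length_cons]
          split_ifs <;> push_cast <;> omega
      · have e1 : List.filter (fun q => decide (q ≠ 0) && decide (q = m)) (p :: rest)
            = List.filter (fun q => decide (q ≠ 0) && decide (q = m)) rest := by
          rw [List.filter_cons, if_neg (by simp [hpm])]
        have e2 : List.filter (fun q => decide (q ≠ 0) && decide (q ≠ m)) (p :: rest)
            = p :: List.filter (fun q => decide (q ≠ 0) && decide (q ≠ m)) rest := by
          rw [List.filter_cons, if_pos (by simp [hp0, hpm])]
        rw [show pvLoopA m count (p :: rest)
              = (if count ≤ 0 then pvLoopA m (count - 1) rest else 0) by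
            simp only [pvLoopA]; rw [if_neg hp0, if_neg hpm]]
        rw [e1, e2]
        by_cases hc : count ≤ 0
        · rw [if_pos hc, ih]
          simp only [List.length_cons]
          split_ifs <;> push_cast <;> omega
        · rw [if_neg hc]
          simp only [List.length_cons]
          split_ifs <;> push_cast <;> omega

-- ===== VERDICT (by name: the statement is the Claim_ definition above) =====
theorem count_open_sequence_spec : Claim_equal_count_open_sequence := by
  intro seq m _
  unfold Spec_count_open_sequence count_open_sequence count_open_sequence_alt
  rw [pvLoopA_char]
  dsimp only
  split_ifs <;> omega
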